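-- pv_equiv track=rewrite | github.com/PythonGoesReddit/Reddit_MDA | Reddit_Bibers_Features.py | feature_07
-- ===== SOURCE A (Python) =====
-- def feature_07(untagged_list):
--     """This function takes a list of words without PoS tags as input and returns the number of items
--     that are second person pronouns."""
--     counter = 0
--     secondpersonlist = ["you", "yourself", "your", "yourselves"]
--     for item in untagged_list:
--         if item in secondpersonlist:
--             counter = counter + 1
--         else:
--             pass
--     return(counter)
-- ===== SOURCE B (Python) =====
-- def feature_07(untagged_list):
--     """This function takes a list of words without PoS tags as input and returns the number of items
--     that are second person pronouns."""
--     counts = {}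
--     for item in untagged_list:
--         counts[item] = counts.get(item, 0) + 1
--     return (counts.get("you", 0) + counts.get("yourself", 0)
--             + counts.get("your", 0) + counts.get("yourselves", 0))
-- ===== Notes on version B (the rewrite author's own statement) =====
-- stated objective: alternative
-- what changed: B builds a full frequency table of the input in one pass and then reads off the four pronoun keys, instead of testing each word against the pronoun list inside the loop.
import Mathlib
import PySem

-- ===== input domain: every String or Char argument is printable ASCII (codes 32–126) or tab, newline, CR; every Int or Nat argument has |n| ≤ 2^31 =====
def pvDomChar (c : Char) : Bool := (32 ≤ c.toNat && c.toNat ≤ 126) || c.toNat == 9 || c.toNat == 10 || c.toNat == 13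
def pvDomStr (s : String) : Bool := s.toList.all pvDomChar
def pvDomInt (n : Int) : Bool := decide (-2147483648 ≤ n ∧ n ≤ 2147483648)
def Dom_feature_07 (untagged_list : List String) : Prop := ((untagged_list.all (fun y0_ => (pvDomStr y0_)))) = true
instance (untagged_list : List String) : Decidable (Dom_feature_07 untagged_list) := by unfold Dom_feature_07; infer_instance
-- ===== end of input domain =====

-- B counts each word once into a frequency table and then reads off the four pronoun keys (alternative decomposition, same cost).

-- ===== PORT A =====
def feature_07 (untagged_list : List String) : Int :=
  untagged_list.foldl
    (fun counter item =>
      if item ∈ ["you", "yourself", "your", "yourselves"] then counter + 1 else counter)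
    0

-- ===== PORT B =====
def feature_07_alt (untagged_list : List String) : Int :=
  let counts : PySem.Dict String Int :=
    untagged_list.foldl (fun d item => d.insert item (d.getD item 0 + 1)) PySem.Dict.empty
  counts.getD "you" 0 + counts.getD "yourself" 0 + counts.getD "your" 0 + counts.getD "yourselves" 0

-- ===== PRECONDITION & SPEC =====
def Spec_feature_07 (untagged_list : List String) (out : Int) : Prop := out = feature_07_alt untagged_list
instance (untagged_list : List String) (out : Int) : Decidable (Spec_feature_07 untagged_list out) := by unfold Spec_feature_07; infer_instance

-- ===== CLAIM (what is proved, stated in full; the proofs are below) =====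
def Claim_equal_feature_07 : Prop := ∀ (untagged_list : List String), Dom_feature_07 untagged_list → Spec_feature_07 untagged_list (feature_07 untagged_list)

-- ===== LEMMAS AND PROOFS =====

-- A's loop counts exactly the occurrences of the four pronouns.
theorem feature_07_eq_counts (xs : List String) (c : Int) :
    xs.foldl
      (fun counter item =>
        if item ∈ ["you", "yourself", "your", "yourselves"] then counter + 1 else counter)
      c
    = c + xs.count "you" + xs.count "yourself" + xs.count "your" + xs.count "yourselves" := by
  induction xs generalizing c with
  | nil => simp
  | cons x xs ih =>
    simp only [List.foldl_cons, ih, List.count_cons]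
    by_cases h1 : x = "you" <;> by_cases h2 : x = "yourself" <;>
      by_cases h3 : x = "your" <;> by_cases h4 : x = "yourselves" <;>
      simp_all <;> ring

-- ===== VERDICT (by name: the statement is the Claim_ definition above) =====
theorem feature_07_spec : Claim_equal_feature_07 := by
  intro xs _
  unfold Spec_feature_07 feature_07 feature_07_alt
  rw [PySem.Dict.foldl_insert_getD_add_one_eq_counter]
  simp only [PySem.Dict.getD_counter]
  rw [feature_07_eq_counts]
  ring
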